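-- pv_equiv track=rewrite | github.com/AssassinCow/2026-H-PJ2 | NER/hmm_ner.py | english_shape
-- ===== SOURCE A (Python) =====
-- def english_shape(word):
--     """Compress the case/digit pattern of a word, e.g. 'Rangarajan' -> 'Aa'."""
--     out = []
--     prev = ''
--     for ch in word:
--         if ch.isdigit():
--             cur = '0'
--         elif ch.isalpha():
--             cur = 'A' if ch.isupper() else 'a'
--         else:
--             cur = ch
--         if cur != prev:
--             out.append(cur)
--             prev = cur
--     return ''.join(out)
-- ===== SOURCE B (Python) =====
-- def english_shape(word):
--     """Compress the case/digit pattern of a word, e.g. 'Rangarajan' -> 'Aa'.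
--
--     Divide and conquer: compress each half recursively and glue the results,
--     merging the boundary if both halves meet on the same shape symbol.
--     """
--     if not word:
--         return ''
--     if len(word) == 1:
--         ch = word
--         if ch.isdigit():
--             return '0'
--         if ch.isalpha():
--             return 'A' if ch.isupper() else 'a'
--         return ch
--     mid = len(word) // 2
--     left = english_shape(word[:mid])
--     right = english_shape(word[mid:])
--     if left[-1] == right[0]:
--         return left + right[1:]
--     return left + right
-- ===== Notes on version B (the rewrite author's own statement) =====
-- stated objective: alternative
-- what changed: Replaces A's linear prev-tracking accumulator scan by a divide-and-conquer recursion: compress each half of the word independently, then concatenate, dropping the right half's first symbol when the two compressed halves meet on the same shape symbol.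
import Mathlib
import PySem

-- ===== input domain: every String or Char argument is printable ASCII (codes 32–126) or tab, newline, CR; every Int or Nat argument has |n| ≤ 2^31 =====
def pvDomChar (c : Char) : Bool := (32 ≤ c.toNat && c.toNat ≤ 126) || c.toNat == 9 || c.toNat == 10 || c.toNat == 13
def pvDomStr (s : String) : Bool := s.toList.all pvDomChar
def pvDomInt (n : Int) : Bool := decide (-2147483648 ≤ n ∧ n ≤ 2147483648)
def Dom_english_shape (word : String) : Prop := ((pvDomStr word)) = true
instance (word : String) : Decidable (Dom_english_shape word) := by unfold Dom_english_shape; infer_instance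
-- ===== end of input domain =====

-- B replaces A's linear prev-tracking scan by a divide-and-conquer recursion (alternative algorithm); same values everywhere.

-- ===== PORT A =====
-- char classification from A's loop body ('0' / 'A' / 'a' / the char itself)
def pvShapeA (ch : Char) : Char :=
  if PySem.Chars.isdigit ch then '0'
  else if PySem.Chars.isalpha ch then (if PySem.Chars.isupper ch then 'A' else 'a')
  else ch

-- prev = '' is modelled as (none : Option Char); a one-char cur never equals ''
def english_shape (word : String) : String :=
  let r := word.toList.foldl
    (fun (st : List Char × Option Char) ch =>
      let cur := pvShapeA ch
      if some cur ≠ st.2 then (st.1 ++ [cur], some cur) else st)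
    ([], none)
  String.ofList r.1

-- ===== PORT B =====
-- Source B's boundary merge 'left + right[1:] if left[-1] == right[0] else left + right';
-- Source B only reaches it with nonempty left/right, so comparing getLast?/head? is exact there
def pvGlue (l r : List Char) : List Char :=
  if l.getLast? = r.head? then l ++ r.tail else l ++ r

def pvBShape (l : List Char) : List Char :=
  match l with
  | [] => []
  | [ch] =>
      if PySem.Chars.isdigit ch then ['0']
      else if PySem.Chars.isalpha ch then (if PySem.Chars.isupper ch then ['A'] else ['a'])
      else [ch]
  | c :: d :: t =>
      let m := (c :: d :: t).length / 2
      pvGlue (pvBShape ((c :: d :: t).take m)) (pvBShape ((c :: d :: t).drop m))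
termination_by l.length
decreasing_by
  · simp; omega
  · simp; omega

def english_shape_alt (word : String) : String :=
  String.ofList (pvBShape word.toList)

-- ===== PRECONDITION & SPEC =====
def Spec_english_shape (word : String) (out : String) : Prop := out = english_shape_alt word
instance (word : String) (out : String) : Decidable (Spec_english_shape word out) := by unfold Spec_english_shape; infer_instance

-- ===== CLAIM (what is proved, stated in full; the proofs are below) =====
def Claim_equal_english_shape : Prop := ∀ (word : String), Dom_english_shape word → Spec_english_shape word (english_shape word)

-- ===== LEMMAS AND PROOFS =====

-- canonical 'drop consecutive duplicates given previous symbol' function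
def pvCollapse (p : Option Char) : List Char → List Char
  | [] => []
  | c :: t => (if some c = p then [] else [c]) ++ pvCollapse (some c) t

lemma pvCollapse_none_cons (c : Char) (t : List Char) :
    pvCollapse none (c :: t) = c :: pvCollapse (some c) t := by
  simp [pvCollapse]

lemma getLast?_cons_or (c : Char) (t : List Char) :
    (c :: t).getLast? = t.getLast?.or (some c) := by
  cases t with
  | nil => simp
  | cons d t' =>
    rw [List.getLast?_cons_cons]
    cases h : (d :: t').getLast? with
    | none => simp [List.getLast?_eq_none_iff] at h
    | some g => simp

-- collapsing preserves the last element
lemma pvCollapse_getLast (t : List Char) : ∀ (x : Char),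
    (x :: pvCollapse (some x) t).getLast? = (x :: t).getLast? := by
  induction t with
  | nil => intro x; rfl
  | cons c t' ih =>
    intro x
    by_cases h : c = x
    · subst h
      rw [show pvCollapse (some c) (c :: t') = pvCollapse (some c) t' from by
        simp [pvCollapse]]
      rw [ih c]
      exact (List.getLast?_cons_cons).symm
    · show (x :: ((if some c = some x then [] else [c]) ++ pvCollapse (some c) t')).getLast? = _
      rw [if_neg (by simp [h]), List.cons_append, List.nil_append,
        List.getLast?_cons_cons, ih c, List.getLast?_cons_cons]

lemma pvCollapse_append (xs : List Char) : ∀ (p : Option Char) (ys : List Char),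
    pvCollapse p (xs ++ ys) = pvCollapse p xs ++ pvCollapse (xs.getLast?.or p) ys := by
  induction xs with
  | nil => intro p ys; simp [pvCollapse]
  | cons c t ih =>
    intro p ys
    show (if some c = p then [] else [c]) ++ pvCollapse (some c) (t ++ ys) = _
    rw [ih (some c) ys]
    have : (c :: t).getLast?.or p = t.getLast?.or (some c) := by
      rw [getLast?_cons_or]; cases t.getLast? <;> simp
    rw [this]
    show _ = ((if some c = p then [] else [c]) ++ pvCollapse (some c) t) ++ _
    simp [List.append_assoc]

-- the merge step is exact on nonempty pieces
lemma pvGlue_collapse (xs ys : List Char) (hx : xs ≠ []) (hy : ys ≠ []) :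
    pvGlue (pvCollapse none xs) (pvCollapse none ys) = pvCollapse none (xs ++ ys) := by
  obtain ⟨a, t1, rfl⟩ := List.exists_cons_of_ne_nil hx
  obtain ⟨y, t2, rfl⟩ := List.exists_cons_of_ne_nil hy
  rw [pvCollapse_append]
  have hlast : (pvCollapse none (a :: t1)).getLast? = (a :: t1).getLast? := by
    rw [pvCollapse_none_cons]; exact pvCollapse_getLast t1 a
  obtain ⟨g, hg⟩ : ∃ g, (a :: t1).getLast? = some g := by
    cases h : (a :: t1).getLast? with
    | none => simp at h
    | some g => exact ⟨g, rfl⟩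
  rw [hg]
  rw [show (some g).or none = some g from rfl]
  unfold pvGlue
  rw [hlast, hg, pvCollapse_none_cons]
  by_cases h : g = y
  · subst h
    rw [if_pos (by simp)]
    show _ = _ ++ pvCollapse (some g) (g :: t2)
    simp [pvCollapse]
  · rw [if_neg (by simp [h])]
    show _ = _ ++ pvCollapse (some g) (y :: t2)
    simp [pvCollapse, Ne.symm h]

lemma pvBShape_eq (l : List Char) : pvBShape l = pvCollapse none (l.map pvShapeA) := by
  induction l using pvBShape.induct with
  | case1 => simp [pvBShape, pvCollapse]
  | case2 ch h => simp [pvBShape, pvCollapse, pvShapeA, h]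
  | case3 ch h1 h2 h3 => simp [pvBShape, pvCollapse, pvShapeA, h1, h2, h3]
  | case4 ch h1 h2 h3 => simp [pvBShape, pvCollapse, pvShapeA, h1, h2, h3]
  | case5 ch h1 h2 => simp [pvBShape, pvCollapse, pvShapeA, h1, h2]
  | case6 c d t m ih1 ih2 =>
    rw [pvBShape]
    rw [ih1, ih2]
    have hm : m = (t.length + 2) / 2 := by
      show (c :: d :: t).length / 2 = _
      simp only [List.length_cons]
    rw [pvGlue_collapse _ _
        (List.ne_nil_of_length_pos (by
          simp only [List.length_map, List.length_take, List.length_cons]; omega))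
        (List.ne_nil_of_length_pos (by
          simp only [List.length_map, List.length_drop, List.length_cons]; omega)),
      ← List.map_append, List.take_append_drop]

lemma foldlA_eq (l : List Char) : ∀ (acc : List Char) (p : Option Char),
    (l.foldl
      (fun (st : List Char × Option Char) ch =>
        let cur := pvShapeA ch
        if some cur ≠ st.2 then (st.1 ++ [cur], some cur) else st)
      (acc, p)).1 = acc ++ pvCollapse p (l.map pvShapeA) := by
  induction l with
  | nil => intro acc p; simp [pvCollapse]
  | cons ch t ih =>
    intro acc p
    by_cases h : some (pvShapeA ch) = p
    · rw [List.foldl_cons,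
        show (let cur := pvShapeA ch;
              if some cur ≠ (acc, p).2 then ((acc, p).1 ++ [cur], some cur)
              else ((acc, p) : List Char × Option Char)) = (acc, p) from by simp [h], ih]
      simp [pvCollapse, h]
    · rw [List.foldl_cons,
        show (let cur := pvShapeA ch;
              if some cur ≠ (acc, p).2 then ((acc, p).1 ++ [cur], some cur)
              else ((acc, p) : List Char × Option Char))
             = (acc ++ [pvShapeA ch], some (pvShapeA ch)) from by simp [h], ih]
      simp [pvCollapse, h]

-- ===== VERDICT (by name: the statement is the Claim_ definition above) =====
theorem english_shape_spec : Claim_equal_english_shape := by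
  intro word _
  unfold Spec_english_shape english_shape english_shape_alt
  rw [pvBShape_eq]
  simp only [foldlA_eq, List.nil_append]
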